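-- pv_equiv track=rewrite | github.com/djfern/PDE1130_SOB31_M00908452 | cowbulls_incomplete.py | compare_numbers
-- ===== SOURCE A (Python) =====
-- def compare_numbers(number, user_guess):
--     ## your code here
--     cow=0 #declared it to 0 so we can add it as a counter variable in the loop, to return the wrong guesses
--     bull=0 #declared it to 0 so we can add it as a counter variable in the loop, to return the correct guesses
--     for x in range(4): #loop to go through each digit
--         if user_guess[x] == number[x]: # condition for correct digit guesses
--             bull = bull + 1
--         else: # condition for wronge digit guesses
--             cow = cow + 1
--     cowbull =[cow, bull]  #store these values to a list so that they can futher be accessed by its index position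
--     return cowbull
-- ===== SOURCE B (Python) =====
-- def compare_numbers(number, user_guess):
--     # Recursively count the bulls over positions x..3; cows are the complement 4 - bulls.
--     def bulls_from(x):
--         if x >= 4:
--             return 0
--         return int(user_guess[x] == number[x]) + bulls_from(x + 1)
--     bull = bulls_from(0)
--     return [4 - bull, bull]
-- ===== Notes on version B (the rewrite author's own statement) =====
-- stated objective: simpler
-- what changed: Replaces the two-counter branching loop by a recursive helper that counts only the bulls from position x onward, and derives cows by the closed-form complement 4 - bull.
import Mathlib
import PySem

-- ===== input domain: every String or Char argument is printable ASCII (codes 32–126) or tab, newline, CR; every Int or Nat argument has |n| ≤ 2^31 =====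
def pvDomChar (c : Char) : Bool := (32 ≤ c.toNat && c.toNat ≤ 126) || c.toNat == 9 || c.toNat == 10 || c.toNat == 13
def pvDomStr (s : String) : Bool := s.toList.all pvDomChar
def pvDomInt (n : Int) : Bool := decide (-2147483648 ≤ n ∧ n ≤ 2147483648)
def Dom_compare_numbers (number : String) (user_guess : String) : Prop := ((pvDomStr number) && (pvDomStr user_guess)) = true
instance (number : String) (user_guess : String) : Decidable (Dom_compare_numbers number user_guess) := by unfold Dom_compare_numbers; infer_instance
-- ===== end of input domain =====

-- B counts bulls with a recursive helper over positions and derives cows as 4 - bull; same return value on Pre_.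


-- ===== PORT A =====
-- loop over range(4) with two counters (cow, bull); indexing via pyGetD is exact on Pre_ (indices 0..3 in range)
def compare_numbers (number : String) (user_guess : String) : List Int :=
  let cb : Int × Int :=
    (PySem.List.pyRange 0 4 1).foldl
      (fun (p : Int × Int) x =>
        if PySem.List.pyGetD user_guess.toList x ' ' = PySem.List.pyGetD number.toList x ' '
        then (p.1, p.2 + 1) else (p.1 + 1, p.2))
      (0, 0)
  [cb.1, cb.2]

-- ===== PORT B =====
-- recursive bulls_from(x): counts matches at positions x..3; cows derived as 4 - bull
def bullsFrom (number : String) (user_guess : String) (x : Nat) : Int :=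
  if _h : x < 4 then
    (if PySem.List.pyGetD user_guess.toList (x : Int) ' ' = PySem.List.pyGetD number.toList (x : Int) ' '
     then (1 : Int) else 0) + bullsFrom number user_guess (x + 1)
  else 0
termination_by 4 - x

def compare_numbers_alt (number : String) (user_guess : String) : List Int :=
  let bull := bullsFrom number user_guess 0
  [4 - bull, bull]

-- ===== PRECONDITION & SPEC =====
-- Pre_ excludes strings shorter than 4 characters, on which A (and B) raise IndexError.
def Pre_compare_numbers (number : String) (user_guess : String) : Prop :=
  4 ≤ number.length ∧ 4 ≤ user_guess.length
instance (number : String) (user_guess : String) : Decidable (Pre_compare_numbers number user_guess) := by unfold Pre_compare_numbers; infer_instance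
def pvWitness_compare_numbers : String × String := ("1234", "1243")
def Spec_compare_numbers (number : String) (user_guess : String) (out : List Int) : Prop := out = compare_numbers_alt number user_guess
instance (number : String) (user_guess : String) (out : List Int) : Decidable (Spec_compare_numbers number user_guess out) := by unfold Spec_compare_numbers; infer_instance

-- ===== CLAIM (what is proved, stated in full; the proofs are below) =====
def Claim_equal_compare_numbers : Prop := ∀ (number : String) (user_guess : String), Dom_compare_numbers number user_guess → Pre_compare_numbers number user_guess → Spec_compare_numbers number user_guess (compare_numbers number user_guess)

-- ===== LEMMAS AND PROOFS =====
theorem pyRange04 : PySem.List.pyRange 0 4 1 = [0, 1, 2, 3] := by decide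

theorem bullsFrom_unfold (number user_guess : String) (x : Nat) :
    bullsFrom number user_guess x =
      if x < 4 then
        (if PySem.List.pyGetD user_guess.toList (x : Int) ' ' = PySem.List.pyGetD number.toList (x : Int) ' '
         then (1 : Int) else 0) + bullsFrom number user_guess (x + 1)
      else 0 := by
  rw [bullsFrom]; split_ifs <;> rfl

-- ===== VERDICT (by name: the statement is the Claim_ definition above) =====
theorem compare_numbers_spec : Claim_equal_compare_numbers := by
  intro number user_guess _ _
  unfold Spec_compare_numbers compare_numbers compare_numbers_alt
  rw [pyRange04]
  rw [bullsFrom_unfold number user_guess 0, bullsFrom_unfold number user_guess 1,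
      bullsFrom_unfold number user_guess 2, bullsFrom_unfold number user_guess 3,
      bullsFrom_unfold number user_guess 4]
  simp only [List.foldl_cons, List.foldl_nil]
  norm_num
  split_ifs <;> norm_num <;> omega
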